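-- pv_equiv track=rewrite | github.com/femkepiepers/Informatica5 | 12b - Roosters/Kleurendriehoek.py | driehoek
-- ===== SOURCE A (Python) =====
-- def volgende_rij(rij):
--     next = []
--     for i in range(0, len(rij) - 1):
--
--         if rij[i] == rij[i + 1]:
--             next.append(rij[i])
--
--         elif rij[i] != rij[i + 1]:
--             kleur = ['Y', 'R', 'G']
--             kleur.remove(rij[i])
--             kleur.remove(rij[i + 1])
--             next.append(kleur[0])
--
--     return next
--
-- def driehoek(rij):
--     helemaal = []
--     i = 0
--     helemaal.append(rij)
--
--     while len(helemaal[i]) > 1: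
--         next = volgende_rij(helemaal[i])
--         helemaal.append(next)
--         i += 1
--
--     return helemaal
-- ===== SOURCE B (Python) =====
-- def driehoek(rij):
--     if len(rij) <= 1:
--         return [rij]
--     volgende = [a if a == b else [c for c in "YRG" if c != a and c != b][0]
--                 for a, b in zip(rij, rij[1:])]
--     return [rij] + driehoek(volgende)
-- ===== Notes on version B (the rewrite author's own statement) =====
-- stated objective: simpler
-- what changed: Replaces A's while-loop with an index into the growing result list (plus a separate index-based next-row helper) by direct recursion over the self-similar triangle, computing the next row in one zip comprehension with a filtered-list lookup instead of indexed pair lookups and double list.remove.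
import Mathlib
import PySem

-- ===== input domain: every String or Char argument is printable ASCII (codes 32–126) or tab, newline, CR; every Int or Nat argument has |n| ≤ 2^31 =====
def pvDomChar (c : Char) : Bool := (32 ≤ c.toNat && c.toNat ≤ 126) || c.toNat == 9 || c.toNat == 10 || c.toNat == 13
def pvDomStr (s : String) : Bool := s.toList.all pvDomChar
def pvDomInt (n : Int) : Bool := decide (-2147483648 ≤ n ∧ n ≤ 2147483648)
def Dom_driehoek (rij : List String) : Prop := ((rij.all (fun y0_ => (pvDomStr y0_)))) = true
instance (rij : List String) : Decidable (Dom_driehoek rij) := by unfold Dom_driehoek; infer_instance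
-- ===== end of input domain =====

-- B replaces A's indexed while-loop accumulation (and index-based next-row helper with double
-- list.remove) by direct recursion over the self-similar triangle with a zip/filtered-lookup row step;
-- objective: simpler.


-- ===== PORT A =====
-- next.append happens at most once per loop index, so the row shrinks; used for termination.
theorem pv_foldl_len_le {α β : Type} (step : List α → β → List α)
    (h : ∀ acc x, (step acc x).length ≤ acc.length + 1) :
    ∀ (l : List β) (acc : List α), (l.foldl step acc).length ≤ acc.length + l.length := by
  intro l
  induction l with
  | nil => intro acc; simp
  | cons x xs ih =>
    intro acc
    simp only [List.foldl_cons, List.length_cons]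
    calc (xs.foldl step (step acc x)).length ≤ (step acc x).length + xs.length := ih _
      _ ≤ acc.length + 1 + xs.length := by have := h acc x; omega
    omega

def volgende_rij (rij : List String) : List String :=
  (PySem.List.pyRange 0 ((rij.length : Int) - 1) 1).foldl (fun next i =>
    match PySem.List.pyGet? rij i, PySem.List.pyGet? rij (i + 1) with
    | some a, some b =>
      if a = b then next ++ [a]
      else if a ≠ b then
        -- kleur = ['Y','R','G']; kleur.remove(rij[i]); kleur.remove(rij[i+1]); next.append(kleur[0])
        match (PySem.List.remove? (["Y", "R", "G"] : List String) a).bind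
                (fun k => PySem.List.remove? k b) with
        | some kleur => next ++ [kleur.headD ""]  -- kleur has exactly one element here
        | none => next                            -- ValueError: excluded by Pre_driehoek
      else next
    | _, _ => next) []                            -- unreachable: i and i+1 are in range

theorem volgende_rij_length_lt (cur : List String) (h : 1 < cur.length) :
    (volgende_rij cur).length < cur.length := by
  have hle := pv_foldl_len_le (α := String) (β := Int)
    (fun next i =>
      match PySem.List.pyGet? cur i, PySem.List.pyGet? cur (i + 1) with
      | some a, some b =>
        if a = b then next ++ [a]
        else if a ≠ b then
          match (PySem.List.remove? (["Y", "R", "G"] : List String) a).bind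
                  (fun k => PySem.List.remove? k b) with
          | some kleur => next ++ [kleur.headD ""]
          | none => next
        else next
      | _, _ => next)
    (by
      intro acc x
      cases ha : PySem.List.pyGet? cur x with
      | none => simp only [ha]; omega
      | some a =>
        cases hb : PySem.List.pyGet? cur (x + 1) with
        | none => simp only [ha, hb]; omega
        | some b =>
          simp only [ha, hb]
          split_ifs with h1
          · simp
          · cases hr : (PySem.List.remove? (["Y", "R", "G"] : List String) a).bind
                (fun k => PySem.List.remove? k b) with
            | none => simp only [hr]; omega
            | some k => simp [hr])
    (PySem.List.pyRange 0 ((cur.length : Int) - 1) 1) []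
  unfold volgende_rij
  have : (PySem.List.pyRange 0 ((cur.length : Int) - 1) 1).length = cur.length - 1 := by
    rw [PySem.List.length_pyRange_one]; omega
  simp only [List.length_nil] at hle
  omega

def driehoekA_loop (helemaal : List (List String)) (cur : List String) : List (List String) :=
  if _h : 1 < cur.length then
    driehoekA_loop (helemaal ++ [volgende_rij cur]) (volgende_rij cur)
  else helemaal
termination_by cur.length
decreasing_by exact volgende_rij_length_lt cur _h

def driehoek (rij : List String) : List (List String) := driehoekA_loop [rij] rij

-- ===== PORT B =====
-- the comprehension's element: a if a == b else [c for c in "YRG" if c != a and c != b][0]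
-- ([0] modelled by headD: the filtered list is nonempty on every input admitted by Pre_driehoek)
def pvStap (a b : String) : String :=
  if a = b then a
  else ((["Y", "R", "G"] : List String).filter (fun c => c != a && c != b)).headD ""

def volgende_rij_alt (rij : List String) : List String :=
  List.zipWith pvStap rij (rij.drop 1)   -- zip(rij, rij[1:])

theorem volgende_rij_alt_length_lt (cur : List String) (h : ¬ cur.length ≤ 1) :
    (volgende_rij_alt cur).length < cur.length := by
  simp only [volgende_rij_alt, List.length_zipWith, List.length_drop]
  omega

def driehoek_alt (rij : List String) : List (List String) :=
  if rij.length ≤ 1 then [rij]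
  else rij :: driehoek_alt (volgende_rij_alt rij)
termination_by rij.length
decreasing_by exact volgende_rij_alt_length_lt rij (by omega)

-- ===== PRECONDITION & SPEC =====
-- Pre_ excludes exactly the inputs on which A raises ValueError (list.remove on a colour outside
-- {'Y','R','G'}): A returns normally iff the row is constant or every entry is one of the three colours.
def Pre_driehoek (rij : List String) : Prop :=
  (∀ x ∈ rij, ∀ y ∈ rij, x = y) ∨ (∀ x ∈ rij, x ∈ (["Y", "R", "G"] : List String))
instance (rij : List String) : Decidable (Pre_driehoek rij) := by unfold Pre_driehoek; infer_instance

def pvWitness_driehoek : List String := ["Y", "R", "G", "G"]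

def Spec_driehoek (rij : List String) (out : List (List String)) : Prop := out = driehoek_alt rij
instance (rij : List String) (out : List (List String)) : Decidable (Spec_driehoek rij out) := by unfold Spec_driehoek; infer_instance

-- ===== CLAIM (what is proved, stated in full; the proofs are below) =====
def Claim_equal_driehoek : Prop := ∀ (rij : List String), Dom_driehoek rij → Pre_driehoek rij → Spec_driehoek rij (driehoek rij)

-- ===== LEMMAS AND PROOFS =====

-- adjacent pairs that A's row step handles without raising
def pvGood (a b : String) : Prop := a = b ∨ (a ∈ (["Y","R","G"] : List String) ∧ b ∈ (["Y","R","G"] : List String))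

theorem pv_alt_eq_map (l : List String) :
    volgende_rij_alt l =
      (List.range (l.length - 1)).map (fun k => pvStap (l.getD k "") (l.getD (k + 1) "")) := by
  apply List.ext_getElem
  · simp [volgende_rij_alt]
  · intro i h1 h2
    have hlen : i + 1 < l.length := by
      simp [volgende_rij_alt] at h1; omega
    simp [volgende_rij_alt, List.getElem_zipWith, List.getD_eq_getElem?_getD, hlen,
      (by omega : i < l.length)]

theorem pvStap_val (a b : String)
    (hg : pvGood a b) (acc : List String) :
    (match PySem.List.pyGet? [a, b] (0 : Int), PySem.List.pyGet? [a, b] ((0 : Int) + 1) with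
      | some a, some b =>
        if a = b then acc ++ [a]
        else if a ≠ b then
          match (PySem.List.remove? (["Y", "R", "G"] : List String) a).bind
                  (fun k => PySem.List.remove? k b) with
          | some kleur => acc ++ [kleur.headD ""]
          | none => acc
        else acc
      | _, _ => acc) = acc ++ [pvStap a b] := by
  show (if a = b then acc ++ [a]
        else if a ≠ b then
          match (PySem.List.remove? (["Y", "R", "G"] : List String) a).bind
                  (fun k => PySem.List.remove? k b) with
          | some kleur => acc ++ [kleur.headD ""]
          | none => acc
        else acc) = acc ++ [pvStap a b]
  by_cases hab : a = b
  · simp [hab, pvStap]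
  · rcases hg with hg | ⟨ha, hb⟩
    · exact absurd hg hab
    · simp only [List.mem_cons, List.not_mem_nil, or_false] at ha hb
      rcases ha with rfl | rfl | rfl <;> rcases hb with rfl | rfl | rfl <;>
        first
          | exact absurd rfl hab
          | rfl

theorem pv_vr_eq (l : List String)
    (h : ∀ k : Nat, k + 1 < l.length → pvGood (l.getD k "") (l.getD (k + 1) "")) :
    volgende_rij l = volgende_rij_alt l := by
  unfold volgende_rij
  rw [PySem.List.pyRange_one, List.foldl_map]
  have hm : ((l.length : Int) - 1 - 0).toNat = l.length - 1 := by omega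
  rw [hm]
  refine Eq.trans (PySem.List.foldl_congr_mem _ _ _
      (g := fun acc (k : Nat) => acc ++ [pvStap (l.getD k "") (l.getD (k + 1) "")])
      (by
        intro acc k hk
        rw [List.mem_range] at hk
        have hk1 : k + 1 < l.length := by omega
        have hga : PySem.List.pyGet? l ((0 : Int) + (k : Int)) = some (l.getD k "") := by
          rw [zero_add, PySem.List.pyGet?_natCast, List.getElem?_eq_getElem (by omega),
            List.getD_eq_getElem?_getD, List.getElem?_eq_getElem (by omega)]
          rfl
        have hgb : PySem.List.pyGet? l ((0 : Int) + (k : Int) + 1) = some (l.getD (k + 1) "") := by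
          have : (0 : Int) + (k : Int) + 1 = ((k + 1 : Nat) : Int) := by push_cast; ring
          rw [this, PySem.List.pyGet?_natCast, List.getElem?_eq_getElem hk1,
            List.getD_eq_getElem?_getD, List.getElem?_eq_getElem hk1]
          rfl
        simp only [hga, hgb]
        have := pvStap_val (l.getD k "") (l.getD (k + 1) "") (h k hk1) acc
        simp only [show PySem.List.pyGet? [l.getD k "", l.getD (k + 1) ""] (0 : Int)
            = some (l.getD k "") from rfl,
          show PySem.List.pyGet? [l.getD k "", l.getD (k + 1) ""] ((0 : Int) + 1)
            = some (l.getD (k + 1) "") from rfl] at this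
        exact this)) ?_
  rw [PySem.List.foldl_append_singleton_eq_map, List.nil_append, pv_alt_eq_map]

theorem pv_getD_mem (l : List String) (i : Nat) (h : i < l.length) : l.getD i "" ∈ l := by
  rw [List.getD_eq_getElem?_getD, List.getElem?_eq_getElem h]
  exact List.getElem_mem _

theorem pv_pre_good (l : List String) (hp : Pre_driehoek l) :
    ∀ k : Nat, k + 1 < l.length → pvGood (l.getD k "") (l.getD (k + 1) "") := by
  intro k hk
  have m1 : l.getD k "" ∈ l := pv_getD_mem l k (by omega)
  have m2 : l.getD (k + 1) "" ∈ l := pv_getD_mem l (k + 1) hk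
  rcases hp with hp | hp
  · exact Or.inl (hp _ m1 _ m2)
  · exact Or.inr ⟨hp _ m1, hp _ m2⟩

theorem pvStap_mem (a b : String) (ha : a ∈ (["Y","R","G"] : List String))
    (hb : b ∈ (["Y","R","G"] : List String)) : pvStap a b ∈ (["Y","R","G"] : List String) := by
  simp only [List.mem_cons, List.not_mem_nil, or_false] at ha hb
  rcases ha with rfl | rfl | rfl <;> rcases hb with rfl | rfl | rfl <;> decide

theorem pv_pre_next (l : List String) (hp : Pre_driehoek l) :
    Pre_driehoek (volgende_rij_alt l) := by
  rw [pv_alt_eq_map]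
  rcases hp with hp | hp
  · left
    intro x hx y hy
    simp only [List.mem_map, List.mem_range] at hx hy
    obtain ⟨i, hi, rfl⟩ := hx
    obtain ⟨j, hj, rfl⟩ := hy
    have ei : l.getD i "" = l.getD (i + 1) "" :=
      hp _ (pv_getD_mem l i (by omega)) _ (pv_getD_mem l (i + 1) (by omega))
    have ej : l.getD j "" = l.getD (j + 1) "" :=
      hp _ (pv_getD_mem l j (by omega)) _ (pv_getD_mem l (j + 1) (by omega))
    simp only [pvStap, if_pos ei, if_pos ej]
    exact hp _ (pv_getD_mem l i (by omega)) _ (pv_getD_mem l j (by omega))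
  · right
    intro x hx
    simp only [List.mem_map, List.mem_range] at hx
    obtain ⟨i, hi, rfl⟩ := hx
    have m1 : l.getD i "" ∈ l := pv_getD_mem l i (by omega)
    have m2 : l.getD (i + 1) "" ∈ l := pv_getD_mem l (i + 1) (by omega)
    exact pvStap_mem _ _ (hp _ m1) (hp _ m2)

theorem pv_loop_eq : ∀ (n : Nat) (l : List String), l.length ≤ n → Pre_driehoek l →
    ∀ acc : List (List String), driehoekA_loop (acc ++ [l]) l = acc ++ driehoek_alt l := by
  intro n
  induction n with
  | zero =>
    intro l hl _ acc
    rw [driehoekA_loop, driehoek_alt]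
    have h0 : l.length = 0 := by omega
    simp [h0]
  | succ n ih =>
    intro l hl hp acc
    rw [driehoekA_loop, driehoek_alt]
    by_cases h : 1 < l.length
    · rw [dif_pos h, if_neg (by omega), pv_vr_eq l (pv_pre_good l hp)]
      have hlt := volgende_rij_alt_length_lt l (by omega)
      have := ih (volgende_rij_alt l) (by omega) (pv_pre_next l hp) (acc ++ [l])
      rw [List.append_assoc] at this ⊢
      rw [this, List.append_assoc]
      rfl
    · rw [dif_neg h, if_pos (by omega)]

-- ===== VERDICT (by name: the statement is the Claim_ definition above) =====
theorem driehoek_spec : Claim_equal_driehoek := by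
  intro rij _ hpre
  unfold Spec_driehoek driehoek
  have := pv_loop_eq rij.length rij le_rfl hpre []
  simpa using this
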